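-- pv_equiv track=rewrite | github.com/ramsaym/stats | pgsql.py | populatecolumnmappingsdict
-- ===== SOURCE A (Python) =====
-- def populatecolumnmappingsdict(colmaps,pydict):
--     i=1 #important for modulus conditional
--     for val in colmaps.split(","):
--         if i==1 or i==2:
--             key= 'x'
--         elif i==3 or i==4:
--             key= 'y'
--         elif i==5 or i==6:
--             key= "yyyy"
--         elif i==7 or i==8:
--             key= "dd"
--         elif i==9 or i==10:
--             key= "time"
--         #every second time other than zero, we create a pairing. i must start at 1 or be checked for zero 0 % 2=0
--         if i % 2 ==0 and i>0:
--             #left: colMapstring is still index starting at 0 so we need to adjust for i=1..n as well as the lookback hence i-2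
--             pydict[key].append(colmaps.split(",")[i-2])
--             #right
--             pydict[key].append(val)
--         i+=1
--     return pydict
-- ===== SOURCE B (Python) =====
-- def populatecolumnmappingsdict(colmaps, pydict):
--     vals = colmaps.split(",")
--     n = len(vals) - len(vals) % 2  # even prefix; a trailing unpaired element is dropped
--     cuts = [0, 2, 4, 6, 8, n]
--     for key, lo, hi in zip(('x', 'y', 'yyyy', 'dd', 'time'), cuts, cuts[1:]):
--         chunk = vals[lo:min(hi, n)]
--         if chunk:
--             pydict[key] += chunk
--     return pydict
-- ===== Notes on version B (the rewrite author's own statement) =====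
-- stated objective: alternative
-- what changed: A walks every split element with a 1-based counter, a modulus test and a bucket key reassigned through an if/elif chain carried across iterations (re-splitting the string for each pair); B never iterates over the elements at all: it splits once, computes each bucket's whole contribution as ONE slice of the split list at fixed cut points [0,2,4,6,8,n] (the even prefix n dropping an unpaired tail, the last slice taking the entire tail to reproduce the stale 'time' bucket), and extends each of the five buckets once.
import Mathlib
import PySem

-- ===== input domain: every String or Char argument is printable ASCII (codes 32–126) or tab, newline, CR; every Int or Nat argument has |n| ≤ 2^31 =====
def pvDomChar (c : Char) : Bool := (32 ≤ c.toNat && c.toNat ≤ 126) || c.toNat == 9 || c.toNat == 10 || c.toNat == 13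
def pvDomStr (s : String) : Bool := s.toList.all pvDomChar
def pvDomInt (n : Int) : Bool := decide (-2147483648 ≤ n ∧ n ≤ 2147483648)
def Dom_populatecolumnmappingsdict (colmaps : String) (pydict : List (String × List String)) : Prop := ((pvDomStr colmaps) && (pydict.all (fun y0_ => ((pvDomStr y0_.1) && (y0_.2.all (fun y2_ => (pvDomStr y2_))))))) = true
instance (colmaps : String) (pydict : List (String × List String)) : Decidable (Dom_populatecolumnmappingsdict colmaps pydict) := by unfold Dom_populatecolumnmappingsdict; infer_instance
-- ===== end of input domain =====

-- B never iterates over the split elements: it splits once and extends each of the five buckets with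
-- ONE slice of the split list at the fixed cut points [0,2,4,6,8,n] (n = even prefix; the last slice
-- takes the whole even tail, which is exactly A's stale-'time' behaviour for pairs past the fifth).
-- Both A and B mutate pydict in place in Python; the equivalence proved here is about the return value.

-- ===== PORT A =====
-- A's if/elif chain assigning `key` (falls through to the carried `key` for i ≥ 11).
def pvAKey (i : Nat) (key : String) : String :=
  if i = 1 ∨ i = 2 then "x"
  else if i = 3 ∨ i = 4 then "y"
  else if i = 5 ∨ i = 6 then "yyyy"
  else if i = 7 ∨ i = 8 then "dd"
  else if i = 9 ∨ i = 10 then "time"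
  else key

-- A's `for val in colmaps.split(",")` loop; state = (dict, carried key, counter i).
-- `pydict[key].append(v)` is Dict.modify (Pre_ guarantees the key is present, where Python would raise KeyError).
def pvALoop (vals0 : List String) (rem : List String)
    (d : PySem.Dict String (List String)) (key : String) (i : Nat) :
    PySem.Dict String (List String) :=
  match rem with
  | [] => d
  | v :: rest =>
    let key := pvAKey i key
    let d := if i % 2 = 0 ∧ 0 < i then
        (d.modify key [] (· ++ [PySem.List.pyGetD vals0 ((i : Int) - 2) ""])).modify key [] (· ++ [v])
      else d
    pvALoop vals0 rest d key (i + 1)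

def populatecolumnmappingsdict (colmaps : String) (pydict : List (String × List String)) : List (String × List String) :=
  let vals := (PySem.Str.split? colmaps ",").getD []  -- sep "," ≠ "", so split? is never none
  -- Python's `key` is unassigned before the first iteration (which assigns it before any use): "" stands in
  (pvALoop vals vals (PySem.Dict.ofList pydict) "" 1).items

-- ===== PORT B =====
def populatecolumnmappingsdict_alt (colmaps : String) (pydict : List (String × List String)) : List (String × List String) :=
  let vals := (PySem.Str.split? colmaps ",").getD []
  let n : Int := (vals.length : Int) - PySem.Int.mod (vals.length : Int) 2
  let cuts : List Int := [0, 2, 4, 6, 8, n]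
  -- `for key, lo, hi in zip(keys, cuts, cuts[1:])`
  ((List.zip ["x", "y", "yyyy", "dd", "time"] (List.zip cuts (PySem.List.slice cuts (some 1) none))).foldl
    (fun d t =>
      let chunk := PySem.List.slice vals (some t.2.1) (some (min t.2.2 n))
      if chunk ≠ [] then d.modify t.1 [] (· ++ chunk) else d)
    (PySem.Dict.ofList pydict)).items

-- ===== PRECONDITION & SPEC =====
-- Pre_ excludes exactly the inputs on which the Python A raises KeyError: a bucket needed for some
-- pair of colmaps' comma-split is missing from pydict (B raises KeyError there too).
def Pre_populatecolumnmappingsdict (colmaps : String) (pydict : List (String × List String)) : Prop :=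
  let n := ((PySem.Str.split? colmaps ",").getD []).length
  let ks := pydict.map Prod.fst
  (2 ≤ n → "x" ∈ ks) ∧ (4 ≤ n → "y" ∈ ks) ∧ (6 ≤ n → "yyyy" ∈ ks) ∧
  (8 ≤ n → "dd" ∈ ks) ∧ (10 ≤ n → "time" ∈ ks)
instance (colmaps : String) (pydict : List (String × List String)) : Decidable (Pre_populatecolumnmappingsdict colmaps pydict) := by unfold Pre_populatecolumnmappingsdict; infer_instance

def pvWitness_populatecolumnmappingsdict : String × (List (String × List String)) :=
  ("a,b,c,d", [("x", []), ("y", ["q"])])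

def Spec_populatecolumnmappingsdict (colmaps : String) (pydict : List (String × List String)) (out : List (String × List String)) : Prop := out = populatecolumnmappingsdict_alt colmaps pydict
instance (colmaps : String) (pydict : List (String × List String)) (out : List (String × List String)) : Decidable (Spec_populatecolumnmappingsdict colmaps pydict out) := by unfold Spec_populatecolumnmappingsdict; infer_instance

-- ===== CLAIM (what is proved, stated in full; the proofs are below) =====
def Claim_equal_populatecolumnmappingsdict : Prop := ∀ (colmaps : String) (pydict : List (String × List String)), Dom_populatecolumnmappingsdict colmaps pydict → Pre_populatecolumnmappingsdict colmaps pydict → Spec_populatecolumnmappingsdict colmaps pydict (populatecolumnmappingsdict colmaps pydict)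

-- ===== LEMMAS AND PROOFS =====

-- the pair-indexed step A's loop amounts to (proof-level; used to relate both ports to one fold)
def pvBStep (vals : List String) (keys : List String)
    (d : PySem.Dict String (List String)) (p : Int) : PySem.Dict String (List String) :=
  let k := PySem.List.pyGetD keys (min p 4) ""
  (d.modify k [] (· ++ [PySem.List.pyGetD vals (2 * p) ""])).modify k []
    (· ++ [PySem.List.pyGetD vals (2 * p + 1) ""])

theorem pvAKey_of_ge (i : Nat) (key : String) (h : 11 ≤ i) : pvAKey i key = key := by
  unfold pvAKey
  rw [if_neg (by omega), if_neg (by omega), if_neg (by omega), if_neg (by omega), if_neg (by omega)]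

-- the key A appends under at even counter 2*p+2 is the table entry keys[min(p,4)]
theorem pvAKey_two_steps (p : Nat) (key : String) (hkey : 5 ≤ p → key = "time") :
    pvAKey (2 * p + 1 + 1) (pvAKey (2 * p + 1) key)
      = PySem.List.pyGetD ["x", "y", "yyyy", "dd", "time"] (min (p : Int) 4) "" := by
  by_cases h5 : 5 ≤ p
  · rw [pvAKey_of_ge _ _ (by omega), pvAKey_of_ge _ _ (by omega), hkey h5,
      show min (p : Int) 4 = 4 by omega]
    rfl
  · interval_cases p <;> rfl

-- The core invariant of A: its loop, entered at odd counter 2*p+1 with the stale-key invariant,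
-- computes the pair-indexed fold over the remaining pair indices.
theorem pvLoop_eq (vals : List String) : ∀ (n p : Nat) (d : PySem.Dict String (List String)) (key : String),
    vals.length ≤ 2 * p + n → (5 ≤ p → key = "time") →
    pvALoop vals (vals.drop (2 * p)) d key (2 * p + 1)
      = (PySem.List.pyRange (p : Int) ((vals.length / 2 : Nat) : Int) 1).foldl
          (pvBStep vals ["x", "y", "yyyy", "dd", "time"]) d := by
  intro n
  induction n using Nat.strong_induction_on with
  | _ n ih =>
    intro p d key hlen hkey
    by_cases hbig : 2 * p + 2 ≤ vals.length
    · -- a full pair remains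
      rcases hd : vals.drop (2 * p) with _ | ⟨a, t⟩
      · exfalso; have := congrArg List.length hd; simp [List.length_drop] at this; omega
      rcases ht : t with _ | ⟨b, rest⟩
      · exfalso; have := congrArg List.length hd; simp [List.length_drop, ht] at this; omega
      subst ht
      have ha : vals[2 * p]? = some a := by
        have h0 : (vals.drop (2 * p))[0]? = some a := by rw [hd]; rfl
        simpa using h0
      have hb : vals[2 * p + 1]? = some b := by
        have h1 : (vals.drop (2 * p))[1]? = some b := by rw [hd]; rfl
        simpa using h1
      have hrest : vals.drop (2 * (p + 1)) = rest := by
        have h2 : vals.drop (2 * (p + 1)) = (vals.drop (2 * p)).drop 2 := by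
          rw [List.drop_drop]; ring_nf
        simp [h2, hd]
      have hga : PySem.List.pyGetD vals (2 * (p : Int)) "" = a := by
        rw [show 2 * (p : Int) = ((2 * p : Nat) : Int) by push_cast; ring,
          PySem.List.pyGetD_natCast]
        simp [List.getD_eq_getElem?_getD, ha]
      have hgb : PySem.List.pyGetD vals (2 * (p : Int) + 1) "" = b := by
        rw [show 2 * (p : Int) + 1 = ((2 * p + 1 : Nat) : Int) by push_cast; ring,
          PySem.List.pyGetD_natCast]
        simp [List.getD_eq_getElem?_getD, hb]
      have hplt : (p : Int) < ((vals.length / 2 : Nat) : Int) := by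
        have hp1 : p + 1 ≤ vals.length / 2 := by omega
        exact_mod_cast hp1
      rw [PySem.List.pyRange_one_cons hplt, List.foldl_cons]
      rw [pvALoop]
      have hodd : ¬ ((2 * p + 1) % 2 = 0 ∧ 0 < 2 * p + 1) := by omega
      rw [if_neg hodd, pvALoop, if_pos (by omega : (2 * p + 1 + 1) % 2 = 0 ∧ 0 < 2 * p + 1 + 1)]
      rw [pvAKey_two_steps p key hkey]
      rw [show ((2 * p + 1 + 1 : Nat) : Int) - 2 = 2 * (p : Int) by push_cast; ring, hga]
      have hstep : pvBStep vals ["x", "y", "yyyy", "dd", "time"] d (p : Int)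
          = (d.modify (PySem.List.pyGetD ["x", "y", "yyyy", "dd", "time"] (min (p : Int) 4) "") []
              (· ++ [a])).modify (PySem.List.pyGetD ["x", "y", "yyyy", "dd", "time"] (min (p : Int) 4) "") []
              (· ++ [b]) := by
        unfold pvBStep; rw [hga, hgb]
      rw [hstep]
      have hkey' : 5 ≤ p + 1 →
          PySem.List.pyGetD ["x", "y", "yyyy", "dd", "time"] (min (p : Int) 4) "" = "time" := by
        intro h4
        rw [show min (p : Int) 4 = 4 by omega]; rfl
      have hih := ih (n - 2) (by omega) (p + 1)
        ((d.modify (PySem.List.pyGetD ["x", "y", "yyyy", "dd", "time"] (min (p : Int) 4) "") []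
            (· ++ [a])).modify (PySem.List.pyGetD ["x", "y", "yyyy", "dd", "time"] (min (p : Int) 4) "") []
            (· ++ [b]))
        (PySem.List.pyGetD ["x", "y", "yyyy", "dd", "time"] (min (p : Int) 4) "")
        (by omega) hkey'
      rw [hrest] at hih
      rw [show 2 * p + 1 + 1 + 1 = 2 * (p + 1) + 1 by ring] at *
      rw [hih, show ((p : Int) + 1) = ((p + 1 : Nat) : Int) by push_cast; ring]
    · -- at most one element remains: both sides leave d unchanged
      have hempty : (PySem.List.pyRange (p : Int) ((vals.length / 2 : Nat) : Int) 1) = [] := by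
        apply PySem.List.pyRange_one_eq_nil
        have hle : vals.length / 2 ≤ p := by omega
        exact_mod_cast hle
      rw [hempty, List.foldl_nil]
      rcases hd : vals.drop (2 * p) with _ | ⟨a, t⟩
      · rw [pvALoop]
      · have hlt : t = [] := by
          have := congrArg List.length hd; simp [List.length_drop] at this
          have h0 : t.length = 0 := by omega
          simpa using h0
        subst hlt
        rw [pvALoop]
        have hodd : ¬ ((2 * p + 1) % 2 = 0 ∧ 0 < 2 * p + 1) := by omega
        rw [if_neg hodd, pvALoop]

-- two same-key appends fuse into one
theorem pvModMod (d : PySem.Dict String (List String)) (k : String) (xs ys : List String) :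
    (d.modify k [] (· ++ xs)).modify k [] (· ++ ys) = d.modify k [] (· ++ (xs ++ ys)) := by
  simp [PySem.Dict.modify, PySem.Dict.getD_insert_self, PySem.Dict.insert_insert_self,
    List.append_assoc]

-- peeling one pair off a slice of even extent
theorem pvTakeSplit (vals : List String) (j hi : Nat) (hj : j < hi) (hhi : 2 * hi ≤ vals.length) :
    (vals.drop (2 * j)).take (2 * hi - 2 * j)
      = PySem.List.pyGetD vals ((2 * j : Nat) : Int) ""
        :: PySem.List.pyGetD vals ((2 * j + 1 : Nat) : Int) ""
        :: ((vals.drop (2 * (j + 1))).take (2 * hi - 2 * (j + 1))) := by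
  have h1 : 2 * j < vals.length := by omega
  have h2 : 2 * j + 1 < vals.length := by omega
  have hdrop : vals.drop (2 * j) = vals[2 * j] :: vals[2 * j + 1] :: vals.drop (2 * (j + 1)) := by
    rw [List.drop_eq_getElem_cons h1, List.drop_eq_getElem_cons h2]
    norm_num [show 2 * (j + 1) = 2 * j + 1 + 1 by ring]
  rw [hdrop, show 2 * hi - 2 * j = (2 * hi - 2 * (j + 1)) + 1 + 1 by omega,
    List.take_succ_cons, List.take_succ_cons,
    PySem.List.pyGetD_natCast, PySem.List.pyGetD_natCast]
  simp [List.getD_eq_getElem?_getD, h1, h2]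

-- a constant-key run of pair steps is a single fused extend with a slice
theorem pvSegFold (vals : List String) (hi : Nat) (k : String) (hhi : 2 * hi ≤ vals.length) :
    ∀ (n lo : Nat), hi ≤ lo + n →
      (∀ p : Nat, lo ≤ p → p < hi →
        PySem.List.pyGetD ["x", "y", "yyyy", "dd", "time"] (min (p : Int) 4) "" = k) →
      ∀ d, (PySem.List.pyRange (lo : Int) (hi : Int) 1).foldl
          (pvBStep vals ["x", "y", "yyyy", "dd", "time"]) d
        = if lo < hi then d.modify k [] (· ++ (vals.drop (2 * lo)).take (2 * hi - 2 * lo)) else d := by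
  intro n
  induction n with
  | zero =>
    intro lo hle hkey d
    rw [if_neg (by omega),
      PySem.List.pyRange_one_eq_nil (by exact_mod_cast (by omega : hi ≤ lo)), List.foldl_nil]
  | succ n ih =>
    intro lo hle hkey d
    by_cases hlt : lo < hi
    · rw [PySem.List.pyRange_one_cons (by exact_mod_cast hlt), List.foldl_cons]
      have hstep : pvBStep vals ["x", "y", "yyyy", "dd", "time"] d (lo : Int)
          = d.modify k [] (· ++ [PySem.List.pyGetD vals ((2 * lo : Nat) : Int) "",
              PySem.List.pyGetD vals ((2 * lo + 1 : Nat) : Int) ""]) := by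
        unfold pvBStep
        rw [hkey lo le_rfl hlt,
          show 2 * (lo : Int) = ((2 * lo : Nat) : Int) by push_cast; ring,
          show ((2 * lo : Nat) : Int) + 1 = ((2 * lo + 1 : Nat) : Int) by push_cast; ring]
        exact pvModMod d k _ _
      rw [hstep, show ((lo : Int) + 1) = ((lo + 1 : Nat) : Int) by push_cast; ring,
        ih (lo + 1) (by omega) (fun p h1 h2 => hkey p (by omega) h2)]
      by_cases hlt2 : lo + 1 < hi
      · rw [if_pos hlt2, if_pos hlt, pvModMod, pvTakeSplit vals lo hi hlt hhi]
        simp only [List.cons_append, List.nil_append]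
      · rw [if_neg hlt2, if_pos hlt, pvTakeSplit vals lo hi hlt hhi,
          show 2 * hi - 2 * (lo + 1) = 0 by omega, List.take_zero]
    · rw [if_neg hlt,
        PySem.List.pyRange_one_eq_nil (by exact_mod_cast Nat.le_of_not_lt hlt), List.foldl_nil]

-- B's slice chunk at cut (2i, 2i+2) in drop/take form, bounds written as clamped pair counts
theorem pvChunk (vals : List String) (m i lo hi : Nat)
    (c c' : Int) (hc : c = 2 * (i : Int)) (hc' : c' = 2 * (i : Int) + 2)
    (hlo : lo = min i m) (hhi : hi = min (i + 1) m) :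
    PySem.List.slice vals (some c) (some (min c' ((2 * m : Nat) : Int)))
      = (vals.drop (2 * lo)).take (2 * hi - 2 * lo) := by
  subst hc hc' hlo hhi
  rw [PySem.List.slice_toNat vals (by positivity) (by omega)]
  by_cases h : i < m
  · rw [show min i m = i by omega, show min (i + 1) m = i + 1 by omega,
      show ((2 * (i : Int))).toNat = 2 * i by omega,
      show (min (2 * (i : Int) + 2) ((2 * m : Nat) : Int)).toNat = 2 * (i + 1) by omega]
  · rw [show (min (2 * (i : Int) + 2) ((2 * m : Nat) : Int)).toNat - (2 * (i : Int)).toNat = 0 by omega,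
      show 2 * min (i + 1) m - 2 * min i m = 0 by omega]
    simp

-- B's last chunk: the whole even tail from cut 8
theorem pvChunkTime (vals : List String) (m lo : Nat)
    (hlo : lo = min 4 m) :
    PySem.List.slice vals (some 8) (some ((2 * m : Nat) : Int))
      = (vals.drop (2 * lo)).take (2 * m - 2 * lo) := by
  subst hlo
  rw [PySem.List.slice_toNat vals (by norm_num) (by omega)]
  by_cases h : 4 ≤ m
  · rw [show min 4 m = 4 by omega, show (((2 * m : Nat) : Int)).toNat = 2 * m by omega,
      show ((8 : Int)).toNat = 2 * 4 by omega]
  · rw [show (((2 * m : Nat) : Int)).toNat - ((8 : Int)).toNat = 0 by omega,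
      show 2 * m - 2 * min 4 m = 0 by omega]
    simp

-- B's nonempty-chunk guard is the nonemptiness of the pair segment
theorem pvIteGuard (vals : List String) (lo hi : Nat) (hhi : 2 * hi ≤ vals.length) (k : String) :
    ∀ d : PySem.Dict String (List String),
    (if (vals.drop (2 * lo)).take (2 * hi - 2 * lo) ≠ [] then
        d.modify k [] (· ++ (vals.drop (2 * lo)).take (2 * hi - 2 * lo)) else d)
      = if lo < hi then d.modify k [] (· ++ (vals.drop (2 * lo)).take (2 * hi - 2 * lo)) else d := by
  intro d
  by_cases h : lo < hi
  · have hne : (vals.drop (2 * lo)).take (2 * hi - 2 * lo) ≠ [] := by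
      have hlen : ((vals.drop (2 * lo)).take (2 * hi - 2 * lo)).length ≠ 0 := by
        rw [List.length_take, List.length_drop]; omega
      exact fun hEq => hlen (by rw [hEq]; rfl)
    rw [if_pos hne, if_pos h]
  · rw [if_neg h, if_neg (by rw [show 2 * hi - 2 * lo = 0 by omega]; simp)]

-- ===== VERDICT (by name: the statement is the Claim_ definition above) =====
theorem populatecolumnmappingsdict_spec : Claim_equal_populatecolumnmappingsdict := by
  intro colmaps pydict _dom _pre
  unfold Spec_populatecolumnmappingsdict populatecolumnmappingsdict populatecolumnmappingsdict_alt
  apply congrArg PySem.Dict.items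
  dsimp only
  generalize (PySem.Str.split? colmaps ",").getD [] = vals
  generalize PySem.Dict.ofList pydict = d0
  set m := vals.length / 2 with hmdef
  have hm : 2 * m ≤ vals.length := by omega
  -- B side: the even prefix length is 2*m
  have hn : (vals.length : Int) - PySem.Int.mod (vals.length : Int) 2 = ((2 * m : Nat) : Int) := by
    rw [PySem.Int.mod_eq_emod_of_pos (by norm_num)]
    omega
  rw [hn, PySem.List.slice_from_one]
  dsimp only [List.tail_cons, List.zip, List.zipWith, List.foldl]
  rw [min_self]
  -- A side: the pair-indexed fold
  have hA := pvLoop_eq vals vals.length 0 d0 "" (by omega) (by omega)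
  simp only [Nat.mul_zero, List.drop_zero, Nat.zero_add, Nat.cast_zero] at hA
  rw [← hmdef] at hA
  rw [hA]
  -- split the pair range at the cut points
  have e1 : PySem.List.pyRange (0 : Int) (m : Int) 1
      = PySem.List.pyRange (0 : Int) ((min 1 m : Nat) : Int) 1
        ++ PySem.List.pyRange ((min 1 m : Nat) : Int) (m : Int) 1 :=
    PySem.List.pyRange_one_append _ _ _ (by omega) (by omega)
  have e2 : PySem.List.pyRange ((min 1 m : Nat) : Int) (m : Int) 1
      = PySem.List.pyRange ((min 1 m : Nat) : Int) ((min 2 m : Nat) : Int) 1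
        ++ PySem.List.pyRange ((min 2 m : Nat) : Int) (m : Int) 1 :=
    PySem.List.pyRange_one_append _ _ _ (by omega) (by omega)
  have e3 : PySem.List.pyRange ((min 2 m : Nat) : Int) (m : Int) 1
      = PySem.List.pyRange ((min 2 m : Nat) : Int) ((min 3 m : Nat) : Int) 1
        ++ PySem.List.pyRange ((min 3 m : Nat) : Int) (m : Int) 1 :=
    PySem.List.pyRange_one_append _ _ _ (by omega) (by omega)
  have e4 : PySem.List.pyRange ((min 3 m : Nat) : Int) (m : Int) 1
      = PySem.List.pyRange ((min 3 m : Nat) : Int) ((min 4 m : Nat) : Int) 1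
        ++ PySem.List.pyRange ((min 4 m : Nat) : Int) (m : Int) 1 :=
    PySem.List.pyRange_one_append _ _ _ (by omega) (by omega)
  rw [e1, e2, e3, e4,
    List.foldl_append, List.foldl_append, List.foldl_append, List.foldl_append]
  -- each segment is one fused extend
  have hs0 := pvSegFold vals (min 1 m) "x" (by omega) (min 1 m) 0 (by omega)
    (by intro p h1 h2; have hp : p = 0 := (by omega); subst hp; decide)
  rw [Nat.cast_zero] at hs0
  have hs1 := pvSegFold vals (min 2 m) "y" (by omega) (min 2 m) (min 1 m) (by omega)
    (by intro p h1 h2; have hp : p = 1 := (by omega); subst hp; decide)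
  have hs2 := pvSegFold vals (min 3 m) "yyyy" (by omega) (min 3 m) (min 2 m) (by omega)
    (by intro p h1 h2; have hp : p = 2 := (by omega); subst hp; decide)
  have hs3 := pvSegFold vals (min 4 m) "dd" (by omega) (min 4 m) (min 3 m) (by omega)
    (by intro p h1 h2; have hp : p = 3 := (by omega); subst hp; decide)
  have hs4 := pvSegFold vals m "time" (by omega) m (min 4 m) (by omega)
    (by intro p h1 h2
        rw [show min ((p : Nat) : Int) 4 = 4 by omega]
        rfl)
  rw [hs0, hs1, hs2, hs3, hs4]
  -- B's slice chunks in the same form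
  rw [pvChunk vals m 0 0 (min 1 m) 0 2 (by norm_num) (by norm_num) (by omega) rfl,
    pvChunk vals m 1 (min 1 m) (min 2 m) 2 4 (by norm_num) (by norm_num) rfl rfl,
    pvChunk vals m 2 (min 2 m) (min 3 m) 4 6 (by norm_num) (by norm_num) rfl rfl,
    pvChunk vals m 3 (min 3 m) (min 4 m) 6 8 (by norm_num) (by norm_num) rfl rfl,
    pvChunkTime vals m (min 4 m) rfl,
    pvIteGuard vals 0 (min 1 m) (by omega) "x",
    pvIteGuard vals (min 1 m) (min 2 m) (by omega) "y",
    pvIteGuard vals (min 2 m) (min 3 m) (by omega) "yyyy",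
    pvIteGuard vals (min 3 m) (min 4 m) (by omega) "dd",
    pvIteGuard vals (min 4 m) m (by omega) "time"]
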